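-- pv_equiv track=rewrite | github.com/donali98/discreta | proyecto-discreta.py | getRightsFor
-- ===== SOURCE A (Python) =====
-- def getRightsFor(param):
--     numbers = []
--     if(param == "even"):
--         for i in range(1, 7):
--             if(i % 2 == 0):
--                 numbers.append(i)
--         return numbers
--     if(param == "odd"):
--         for i in range(1, 7):
--             if(i % 2 != 0):
--                 numbers.append(i)
--     return numbers
-- ===== SOURCE B (Python) =====
-- def getRightsFor(param):
--     return list({"even": (2, 4, 6), "odd": (1, 3, 5)}.get(param, ()))
-- ===== Notes on version B (the rewrite author's own statement) =====
-- stated objective: simpler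
-- what changed: Replaces the two range(1,7) loops with parity tests by a direct table lookup of the precomputed answer, building a fresh list per call.
import Mathlib
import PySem

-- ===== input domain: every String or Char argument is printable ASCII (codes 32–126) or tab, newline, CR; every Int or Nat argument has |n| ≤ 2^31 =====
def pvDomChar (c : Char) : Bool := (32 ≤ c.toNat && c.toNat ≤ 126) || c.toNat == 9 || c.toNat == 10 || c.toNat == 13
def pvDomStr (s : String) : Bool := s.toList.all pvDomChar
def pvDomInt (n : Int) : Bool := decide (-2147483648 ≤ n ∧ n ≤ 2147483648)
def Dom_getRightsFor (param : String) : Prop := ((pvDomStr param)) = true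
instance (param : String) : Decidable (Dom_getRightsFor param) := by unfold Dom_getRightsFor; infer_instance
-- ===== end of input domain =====

-- B replaces the two parity-filter loops with a precomputed table lookup (objective: simpler).
-- ===== PORT A =====
-- literal port of A: two range(1,7) loops appending on parity tests
def getRightsFor (param : String) : List Int :=
  let numbers : List Int := []
  if param == "even" then
    (PySem.List.pyRange 1 7 1).foldl (fun acc i => if i % 2 == 0 then acc ++ [i] else acc) numbers
  else
    if param == "odd" then
      (PySem.List.pyRange 1 7 1).foldl (fun acc i => if i % 2 != 0 then acc ++ [i] else acc) numbers
    else
      numbers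

-- ===== PORT B =====
-- port of B: direct table lookup, no loop or parity test
def getRightsFor_alt (param : String) : List Int :=
  PySem.Dict.getD (PySem.Dict.ofList [("even", [(2:Int), 4, 6]), ("odd", [1, 3, 5])]) param []

-- ===== PRECONDITION & SPEC =====
def Spec_getRightsFor (param : String) (out : List Int) : Prop := out = getRightsFor_alt param
instance (param : String) (out : List Int) : Decidable (Spec_getRightsFor param out) := by unfold Spec_getRightsFor; infer_instance

-- ===== CLAIM (what is proved, stated in full; the proofs are below) =====
def Claim_equal_getRightsFor : Prop := ∀ (param : String), Dom_getRightsFor param → Spec_getRightsFor param (getRightsFor param)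

-- ===== LEMMAS AND PROOFS =====

-- ===== VERDICT (by name: the statement is the Claim_ definition above) =====
theorem getRightsFor_spec : Claim_equal_getRightsFor := by
  intro param _
  unfold Spec_getRightsFor getRightsFor getRightsFor_alt
  by_cases h : param = "even"
  · subst h; decide
  · by_cases h2 : param = "odd"
    · subst h2; decide
    · simp only [PySem.Dict.getD]
      rw [show PySem.Dict.ofList [("even", [(2:Int), 4, 6]), ("odd", [1, 3, 5])]
            = PySem.Dict.mk [("even", [(2:Int), 4, 6]), ("odd", [1, 3, 5])] from rfl]
      simp [h, h2,
        show ("even" == param) = false by simpa using fun e => h e.symm,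
        show ("odd" == param) = false by simpa using fun e => h2 e.symm, PySem.Dict.get?]
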